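-- pv_equiv track=rewrite | github.com/elimanningfan/nafsma-legislative-tracker | src/sources/congress.py | filter_bills_by_title_keywords
-- ===== SOURCE A (Python) =====
-- from typing import Any
--
-- def filter_bills_by_title_keywords(
--
--     bills: list[dict[str, Any]],
--     keywords: list[str],
-- ) -> list[dict[str, Any]]:
--     """Filter bills by checking if title contains any keyword.
--
--     Args:
--         bills: List of bill data dictionaries.
--         keywords: List of keywords to match (case-insensitive).
--
--     Returns:
--         Filtered list of bills.
--     """
--     keywords_lower = [kw.lower() for kw in keywords]
--     matching = []
--
--     for bill in bills:
--         title = bill.get("title", "").lower()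
--         if any(kw in title for kw in keywords_lower):
--             matching.append(bill)
--
--     return matching
-- ===== SOURCE B (Python) =====
-- def filter_bills_by_title_keywords(bills, keywords):
--     """Filter bills whose title contains any keyword (case-insensitive).
--
--     Alternative strategy: lower every title once, then sweep keyword-by-keyword
--     over the titles collecting the set of matching bill indices, and finally
--     emit the bills whose index was hit, in original order.
--     """
--     titles = [bill.get("title", "").lower() for bill in bills]
--     hits = set()
--     for kw in keywords:
--         k = kw.lower()
--         for i, title in enumerate(titles):
--             if k in title:
--                 hits.add(i)
--     return [bill for i, bill in enumerate(bills) if i in hits]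
-- ===== Notes on version B (the rewrite author's own statement) =====
-- stated objective: alternative
-- what changed: Instead of scanning each bill and asking any(keyword in title), B lowers all titles once, loops keyword-outer over the titles collecting a set of matching bill indices, and finally emits the bills whose index was hit, preserving order.
import Mathlib
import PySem

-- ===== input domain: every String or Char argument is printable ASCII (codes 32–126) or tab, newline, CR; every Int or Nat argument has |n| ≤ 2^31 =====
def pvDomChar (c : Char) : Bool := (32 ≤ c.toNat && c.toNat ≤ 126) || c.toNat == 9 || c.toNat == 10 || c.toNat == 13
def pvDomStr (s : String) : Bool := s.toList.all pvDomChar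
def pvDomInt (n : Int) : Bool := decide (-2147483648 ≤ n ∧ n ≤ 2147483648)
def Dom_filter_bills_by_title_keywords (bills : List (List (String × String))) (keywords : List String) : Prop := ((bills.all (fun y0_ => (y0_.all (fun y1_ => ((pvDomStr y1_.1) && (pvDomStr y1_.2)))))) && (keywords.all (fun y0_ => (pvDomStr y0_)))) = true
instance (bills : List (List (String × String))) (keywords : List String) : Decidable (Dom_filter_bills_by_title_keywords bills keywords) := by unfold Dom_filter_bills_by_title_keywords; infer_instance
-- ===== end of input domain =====

-- B replaces A's per-bill any(keyword in title) scan by a keyword-outer sweep that collects a set of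
-- matching bill indices over once-lowered titles (alternative traversal, not claimed faster).

-- ===== PORT A =====
def filter_bills_by_title_keywords (bills : List (List (String × String))) (keywords : List String) : List (List (String × String)) :=
  let keywords_lower := keywords.map (fun kw => PySem.Str.lower kw)
  bills.foldl (fun matching bill =>
    let title := PySem.Str.lower (PySem.Dict.getD (PySem.Dict.mk bill) "title" "")
    if keywords_lower.any (fun kw => PySem.Str.isIn kw title) then matching ++ [bill] else matching) []

-- ===== PORT B =====
-- the per-bill lowered title (B computes these once, up front)
def pvLowerTitle (bill : List (String × String)) : String :=
  PySem.Str.lower (PySem.Dict.getD (PySem.Dict.mk bill) "title" "")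

def filter_bills_by_title_keywords_alt (bills : List (List (String × String))) (keywords : List String) : List (List (String × String)) :=
  let titles := bills.map pvLowerTitle
  let hits : PySem.Set Int := keywords.foldl (fun hits kw =>
    let k := PySem.Str.lower kw
    (PySem.List.enumerate titles 0).foldl
      (fun hits p => if PySem.Str.isIn k p.2 then PySem.Set.add hits p.1 else hits) hits) PySem.Set.empty
  (PySem.List.enumerate bills 0).filterMap (fun p => if PySem.Set.contains hits p.1 then some p.2 else none)

-- ===== PRECONDITION & SPEC =====
def Spec_filter_bills_by_title_keywords (bills : List (List (String × String))) (keywords : List String) (out : List (List (String × String))) : Prop := out = filter_bills_by_title_keywords_alt bills keywords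
instance (bills : List (List (String × String))) (keywords : List String) (out : List (List (String × String))) : Decidable (Spec_filter_bills_by_title_keywords bills keywords out) := by unfold Spec_filter_bills_by_title_keywords; infer_instance

-- ===== CLAIM (what is proved, stated in full; the proofs are below) =====
def Claim_equal_filter_bills_by_title_keywords : Prop := ∀ (bills : List (List (String × String))) (keywords : List String), Dom_filter_bills_by_title_keywords bills keywords → Spec_filter_bills_by_title_keywords bills keywords (filter_bills_by_title_keywords bills keywords)

-- ===== LEMMAS AND PROOFS =====

-- the common match predicate
def pvMatch (keywords : List String) (bill : List (String × String)) : Bool :=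
  keywords.any (fun kw => PySem.Str.isIn (PySem.Str.lower kw) (pvLowerTitle bill))

lemma a_eq_filter (bills : List (List (String × String))) (keywords : List String) :
    filter_bills_by_title_keywords bills keywords = bills.filter (pvMatch keywords) := by
  unfold filter_bills_by_title_keywords
  rw [PySem.List.foldl_append_if_eq_filter, List.nil_append]
  apply List.filter_congr
  intro bill _
  simp [pvMatch, pvLowerTitle, List.any_map, Function.comp_def]

-- inner sweep: membership in the hit set after scanning all (index, title) pairs
lemma mem_inner (q : String → Bool) :
    ∀ (titles : List String) (n : Int) (s : PySem.Set Int) (i : Int),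
      i ∈ (PySem.List.enumerate titles n).foldl
            (fun hits p => if q p.2 then PySem.Set.add hits p.1 else hits) s ↔
      i ∈ s ∨ ∃ k : Nat, ∃ _ : k < titles.length, i = n + k ∧ q titles[k] = true := by
  intro titles
  induction titles with
  | nil => intro n s i; simp [PySem.List.enumerate]
  | cons t ts ih =>
    intro n s i
    rw [PySem.List.enumerate_cons, List.foldl_cons, ih]
    constructor
    · rintro (h | ⟨k, hk, rfl, hq⟩)
      · by_cases hqt : q t = true
        · simp only [hqt, if_pos] at h
          rcases (PySem.Set.mem_add _ _ _).mp h with h | rfl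
          · exact Or.inl h
          · exact Or.inr ⟨0, by simp, by simp, hqt⟩
        · simp only [hqt] at h; simp at h
          exact Or.inl h
      · exact Or.inr ⟨k + 1, by simp only [List.length_cons]; omega, by push_cast; ring, by simpa using hq⟩
    · rintro (h | ⟨k, hk, rfl, hq⟩)
      · refine Or.inl ?_
        split
        · exact (PySem.Set.mem_add _ _ _).mpr (Or.inl h)
        · exact h
      · match k with
        | 0 =>
          refine Or.inl ?_
          simp only [List.getElem_cons_zero] at hq
          simp only [hq, if_pos]
          exact (PySem.Set.mem_add _ _ _).mpr (Or.inr (by simp))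
        | k + 1 =>
          exact Or.inr ⟨k, by simp only [List.length_cons] at hk; omega, by push_cast; ring, by simpa using hq⟩

-- outer sweep over keywords
lemma mem_outer (titles : List String) :
    ∀ (kws : List String) (s : PySem.Set Int) (i : Int),
      i ∈ kws.foldl (fun hits kw =>
            let k := PySem.Str.lower kw
            (PySem.List.enumerate titles 0).foldl
              (fun hits p => if PySem.Str.isIn k p.2 then PySem.Set.add hits p.1 else hits) hits) s ↔
      i ∈ s ∨ ∃ kw ∈ kws, ∃ k : Nat, ∃ _ : k < titles.length,
        i = (k : Int) ∧ PySem.Str.isIn (PySem.Str.lower kw) titles[k] = true := by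
  intro kws
  induction kws with
  | nil => intro s i; simp
  | cons kw kws ih =>
    intro s i
    rw [List.foldl_cons, ih]
    rw [mem_inner]
    constructor
    · rintro ((h | ⟨k, hk, rfl, hq⟩) | ⟨kw', hkw', k, hk, rfl, hq⟩)
      · exact Or.inl h
      · exact Or.inr ⟨kw, by simp, k, hk, by simp, hq⟩
      · exact Or.inr ⟨kw', by simp [hkw'], k, hk, rfl, hq⟩
    · rintro (h | ⟨kw', hkw', k, hk, rfl, hq⟩)
      · exact Or.inl (Or.inl h)
      · rcases List.mem_cons.mp hkw' with rfl | hmem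
        · exact Or.inl (Or.inr ⟨k, hk, by simp, hq⟩)
        · exact Or.inr ⟨kw', hmem, k, hk, rfl, hq⟩

-- final pass: filterMap over enumerate with an index test is a filter, given the test matches
lemma filterMap_enum {α : Type} (P : α → Bool) (c : Int → Bool) :
    ∀ (xs : List α) (n : Int),
      (∀ k : Nat, (h : k < xs.length) → c (n + k) = P xs[k]) →
      (PySem.List.enumerate xs n).filterMap (fun p => if c p.1 then some p.2 else none)
        = xs.filter P := by
  intro xs
  induction xs with
  | nil => intro n _; simp [PySem.List.enumerate]
  | cons x xs ih =>
    intro n hc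
    have h0 : c n = P x := by simpa using hc 0 (by simp)
    have hrest := ih (n + 1) (fun k hk => by
      have := hc (k + 1) (by simp only [List.length_cons]; omega)
      simpa [add_assoc, add_comm, add_left_comm] using this)
    rw [PySem.List.enumerate_cons, List.filterMap_cons]
    simp only [h0, hrest, List.filter_cons]
    cases P x <;> simp

lemma set_contains_iff (s : PySem.Set Int) (i : Int) :
    PySem.Set.contains s i = true ↔ i ∈ s := by
  simp [PySem.Set.contains]

lemma b_eq_filter (bills : List (List (String × String))) (keywords : List String) :
    filter_bills_by_title_keywords_alt bills keywords = bills.filter (pvMatch keywords) := by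
  unfold filter_bills_by_title_keywords_alt
  set titles := bills.map pvLowerTitle with htitles
  apply filterMap_enum
  intro k hk
  have hk' : k < titles.length := by simpa [htitles] using hk
  have hchar : ∀ i : Int,
      PySem.Set.contains (keywords.foldl (fun hits kw =>
        let kl := PySem.Str.lower kw
        (PySem.List.enumerate titles 0).foldl
          (fun hits p => if PySem.Str.isIn kl p.2 then PySem.Set.add hits p.1 else hits) hits)
        PySem.Set.empty) i = true ↔
      ∃ kw ∈ keywords, ∃ j : Nat, ∃ _ : j < titles.length,
        i = (j : Int) ∧ PySem.Str.isIn (PySem.Str.lower kw) titles[j] = true := by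
    intro i
    rw [set_contains_iff, mem_outer]
    simp [PySem.Set.empty]
  rw [Bool.eq_iff_iff, hchar]
  have hget : titles[k] = pvLowerTitle bills[k] := by simp [htitles]
  constructor
  · rintro ⟨kw, hkw, j, hj, hij, hq⟩
    have : j = k := by omega
    subst this
    rw [hget] at hq
    exact List.any_eq_true.mpr ⟨kw, hkw, hq⟩
  · intro hm
    rcases List.any_eq_true.mp hm with ⟨kw, hkw, hq⟩
    exact ⟨kw, hkw, k, hk', by omega, by rw [hget]; exact hq⟩

-- ===== VERDICT (by name: the statement is the Claim_ definition above) =====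
theorem filter_bills_by_title_keywords_spec : Claim_equal_filter_bills_by_title_keywords := by
  intro bills keywords _
  unfold Spec_filter_bills_by_title_keywords
  rw [a_eq_filter, b_eq_filter]
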